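-- pv_equiv track=rewrite | github.com/vs-uulm/nemesys | src/inference/segments.py | zeroSequences
-- ===== SOURCE A (Python) =====
-- from typing import Dict, List, Union, Type, Any, Tuple, Iterable
--
-- def zeroSequences(sequence) -> Tuple[List, List]:
--     """
--     Determine begins and ends of sequences of zeros in value.
--
--     :param sequence: A sequence of subscriptable values.
--     :return: a list of two lists:
--         One of the sequence indices of the zero begin/ends,
--         and one of the corresponding zero values.
--     """
--     zeros = ([], [])
--     for index, center in enumerate(sequence[1:-1], 1):
--         before = sequence[index - 1]
--         after = sequence[index + 1]
--         if center == 0: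
--             if before != 0 and after == 0 or before == 0 and after != 0:
--                 zeros[0].append(index)
--                 zeros[1].append(center)
--     return zeros
-- ===== SOURCE B (Python) =====
-- def zeroSequences(sequence):
--     """
--     Run-based reimplementation: group the sequence into maximal runs of zeros
--     (one pass tracking the current run's start); every run of length >= 2
--     contributes its begin and end index, kept only when they lie strictly
--     inside the sequence (1 .. len-2).
--     """
--     n = len(sequence)
--     indices = []
--     values = []
--
--     def close(s, e):
--         # the maximal zero-run sequence[s..e] has ended
--         if e > s:  # an isolated zero is no begin/end of a zero sequence
--             if 1 <= s <= n - 2: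
--                 indices.append(s)
--                 values.append(sequence[s])
--             if 1 <= e <= n - 2:
--                 indices.append(e)
--                 values.append(sequence[e])
--
--     start = None
--     for i, v in enumerate(sequence):
--         if v == 0:
--             if start is None:
--                 start = i
--         elif start is not None:
--             close(start, i - 1)
--             start = None
--     if start is not None:
--         close(start, n - 1)
--     return (indices, values)
-- ===== Notes on version B (the rewrite author's own statement) =====
-- stated objective: alternative
-- what changed: Replaced the per-index three-element window test over enumerate(sequence[1:-1],1) by a single pass that tracks maximal runs of zeros and, when a run of length >= 2 closes, emits its begin and end index if they lie strictly inside the sequence.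
import Mathlib
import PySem

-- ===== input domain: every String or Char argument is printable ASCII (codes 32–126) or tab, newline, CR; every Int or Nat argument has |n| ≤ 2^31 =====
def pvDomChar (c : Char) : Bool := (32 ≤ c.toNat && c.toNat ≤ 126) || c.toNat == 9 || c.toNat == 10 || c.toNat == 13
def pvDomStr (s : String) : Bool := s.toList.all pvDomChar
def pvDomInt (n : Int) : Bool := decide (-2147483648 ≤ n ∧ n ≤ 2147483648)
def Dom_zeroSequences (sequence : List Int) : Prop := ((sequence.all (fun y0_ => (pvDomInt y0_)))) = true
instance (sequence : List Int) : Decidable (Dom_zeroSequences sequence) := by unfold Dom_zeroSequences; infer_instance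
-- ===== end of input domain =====

-- B replaces A's per-index three-element-window test by a one-pass grouping into maximal
-- zero-runs that emits each closed run's interior begin/end indices (objective: alternative).

-- ===== PORT A =====
-- for index, center in enumerate(sequence[1:-1], 1): look at neighbours, collect transition indices
def zeroSequences (sequence : List Int) : List Int × List Int :=
  (PySem.List.enumerate (PySem.List.slice sequence (some 1) (some (-1))) 1).foldl
    (fun zeros ic =>
      let index := ic.1
      let center := ic.2
      let before := PySem.List.pyGetD sequence (index - 1) 0  -- index-1 ∈ [0, n-3]: always in range
      let after := PySem.List.pyGetD sequence (index + 1) 0   -- index+1 ∈ [2, n-1]: always in range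
      if center = 0 then
        if (before ≠ 0 ∧ after = 0) ∨ (before = 0 ∧ after ≠ 0) then
          (zeros.1 ++ [index], zeros.2 ++ [center])
        else zeros
      else zeros)
    ([], [])

-- ===== PORT B =====
-- close(s, e): the maximal zero-run sequence[s..e] has ended; emit its interior endpoints
def pvClose (n : Int) (sequence : List Int) (acc : List Int × List Int) (s e : Int) :
    List Int × List Int :=
  if s < e then
    let acc1 :=
      if 1 ≤ s ∧ s ≤ n - 2 then (acc.1 ++ [s], acc.2 ++ [PySem.List.pyGetD sequence s 0]) else acc
    if 1 ≤ e ∧ e ≤ n - 2 then (acc1.1 ++ [e], acc1.2 ++ [PySem.List.pyGetD sequence e 0]) else acc1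
  else acc

-- the 'for i, v in enumerate(sequence)' loop tracking the current zero-run's start
def pvLoop (n : Int) (sequence : List Int) :
    List Int → Int → Option Int → (List Int × List Int) → List Int × List Int
  | [], _i, start, acc =>
    match start with
    | some s => pvClose n sequence acc s (n - 1)
    | none => acc
  | v :: rest, i, start, acc =>
    if v = 0 then
      pvLoop n sequence rest (i + 1) (match start with | none => some i | some s => some s) acc
    else
      match start with
      | some s => pvLoop n sequence rest (i + 1) none (pvClose n sequence acc s (i - 1))
      | none => pvLoop n sequence rest (i + 1) none acc

def zeroSequences_alt (sequence : List Int) : List Int × List Int :=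
  pvLoop (sequence.length : Int) sequence sequence 0 none ([], [])

-- ===== PRECONDITION & SPEC =====
def Spec_zeroSequences (sequence : List Int) (out : List Int × List Int) : Prop := out = zeroSequences_alt sequence
instance (sequence : List Int) (out : List Int × List Int) : Decidable (Spec_zeroSequences sequence out) := by unfold Spec_zeroSequences; infer_instance

-- ===== CLAIM (what is proved, stated in full; the proofs are below) =====
def Claim_equal_zeroSequences : Prop := ∀ (sequence : List Int), Dom_zeroSequences sequence → Spec_zeroSequences sequence (zeroSequences sequence)

-- ===== LEMMAS AND PROOFS =====

-- sequence[i] with default (always in range where used)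
def pvG (seq : List Int) (i : Int) : Int := PySem.List.pyGetD seq i 0

-- A's emission condition at step i (1 ≤ i folded in: A's loop starts at index 1)
def pvCond (seq : List Int) (i : Int) : Bool :=
  decide (1 ≤ i ∧ pvG seq i = 0 ∧
    ((pvG seq (i - 1) ≠ 0 ∧ pvG seq (i + 1) = 0) ∨ (pvG seq (i - 1) = 0 ∧ pvG seq (i + 1) ≠ 0)))

-- A's emissions at steps ≥ m
def pvF (seq : List Int) (m : Int) : List Int :=
  (PySem.List.pyRange m ((seq.length : Int) - 1) 1).filter (fun i => pvCond seq i)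

-- B's remaining emissions from state (position j, open-run start)
def pvE (seq : List Int) (j : Int) : Option Int → List Int
  | none => pvF seq j
  | some s => (if 1 ≤ s ∧ s ≤ j - 2 then [s] else []) ++ pvF seq (j - 1)

lemma pv_slice_eq (xs : List Int) :
    PySem.List.slice xs (some 1) (some (-1)) = (xs.drop 1).take (xs.length - 2) := by
  rcases xs with _ | ⟨a, t⟩
  · decide
  · simp [PySem.List.slice, PySem.List.clampIdx]
    split_ifs with h <;> omega

lemma pv_drop_cons (xs : List Int) (j : Int) (v : Int) (t : List Int) (hj : 0 ≤ j)
    (h : xs.drop j.toNat = v :: t) :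
    pvG xs j = v ∧ xs.drop (j + 1).toNat = t ∧ (j : Int) < xs.length := by
  have hlt : j.toNat < xs.length := by
    by_contra hc
    simp [List.drop_eq_nil_of_le (Nat.le_of_not_lt hc)] at h
  have hv : xs[j.toNat] = v := by
    have : (xs.drop j.toNat)[0]'(by simp [h]) = xs[j.toNat + 0] := List.getElem_drop ..
    simpa [h] using this.symm
  refine ⟨?_, ?_, ?_⟩
  · rw [pvG, PySem.List.pyGetD_eq_getElem (h0 := hj) (h1 := by omega)]; exact hv
  · have h1 : (j + 1).toNat = j.toNat + 1 := by omega
    have := congrArg List.tail h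
    simpa [h1, List.tail_drop] using this
  · omega

lemma pvF_nil (seq : List Int) (m : Int) (h : (seq.length : Int) - 1 ≤ m) : pvF seq m = [] := by
  rw [pvF, PySem.List.pyRange_one_eq_nil h]; rfl

lemma pvF_cons (seq : List Int) (m : Int) (h : m < (seq.length : Int) - 1) :
    pvF seq m = (if pvCond seq m then [m] else []) ++ pvF seq (m + 1) := by
  rw [pvF, PySem.List.pyRange_one_cons h, List.filter_cons]
  cases hc : pvCond seq m <;> simp [pvF]

lemma pv_foldl_pair_append_if {α : Type} (p : α → Bool) (f gfun : α → Int) (l : List α)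
    (acc : List Int × List Int) :
    l.foldl (fun z x => if p x then (z.1 ++ [f x], z.2 ++ [gfun x]) else z) acc
      = (acc.1 ++ (l.filter p).map f, acc.2 ++ (l.filter p).map gfun) := by
  induction l generalizing acc with
  | nil => simp
  | cons x t ih => by_cases h : p x <;> simp [h, ih]

lemma pv_filter_map {α β : Type} (f : α → β) (p : β → Bool) (l : List α) :
    (l.map f).filter p = (l.filter (fun x => p (f x))).map f := by
  induction l with
  | nil => simp
  | cons x t ih => cases h : p (f x) <;> simp [h, ih]

lemma pv_enum_slice (seq : List Int) :
    PySem.List.enumerate (PySem.List.slice seq (some 1) (some (-1))) 1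
      = (PySem.List.pyRange 1 ((seq.length : Int) - 1) 1).map (fun i => (i, pvG seq i)) := by
  rw [pv_slice_eq]
  apply List.ext_getElem
  · simp [PySem.List.length_enumerate, PySem.List.length_pyRange_one]
    omega
  · intro k h1 h2
    rw [PySem.List.getElem_enumerate]
    simp only [List.getElem_map, PySem.List.getElem_pyRange_one]
    have hk : k < seq.length - 2 := by
      simp [PySem.List.length_enumerate] at h1; omega
    rw [Prod.mk.injEq]
    refine ⟨rfl, ?_⟩
    rw [List.getElem_take, List.getElem_drop]
    rw [pvG, PySem.List.pyGetD_eq_getElem (h0 := by omega) (h1 := by omega)]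
    congr 1

-- A computes (pvF seq 1, zeros of the same length)
lemma pv_A_char (seq : List Int) :
    zeroSequences seq = (pvF seq 1, (pvF seq 1).map (fun _ => (0 : Int))) := by
  unfold zeroSequences
  rw [pv_enum_slice]
  have hfun : (fun (zeros : List Int × List Int) (ic : Int × Int) =>
      let index := ic.1
      let center := ic.2
      let before := PySem.List.pyGetD seq (index - 1) 0
      let after := PySem.List.pyGetD seq (index + 1) 0
      if center = 0 then
        if (before ≠ 0 ∧ after = 0) ∨ (before = 0 ∧ after ≠ 0) then
          (zeros.1 ++ [index], zeros.2 ++ [center])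
        else zeros
      else zeros)
      = (fun z x => if (fun (ic : Int × Int) => decide (ic.2 = 0 ∧
          ((pvG seq (ic.1 - 1) ≠ 0 ∧ pvG seq (ic.1 + 1) = 0) ∨
           (pvG seq (ic.1 - 1) = 0 ∧ pvG seq (ic.1 + 1) ≠ 0)))) x
          then (z.1 ++ [x.1], z.2 ++ [x.2]) else z) := by
    funext z x
    simp only [pvG, decide_eq_true_eq]
    split_ifs <;> tauto
  rw [hfun, pv_foldl_pair_append_if, pv_filter_map]
  have hfilter : ((PySem.List.pyRange 1 ((seq.length : Int) - 1) 1).filter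
        (fun i => decide ((pvG seq i = 0 ∧
          ((pvG seq (i - 1) ≠ 0 ∧ pvG seq (i + 1) = 0) ∨
           (pvG seq (i - 1) = 0 ∧ pvG seq (i + 1) ≠ 0))))))
      = pvF seq 1 := by
    rw [pvF]
    apply List.filter_congr
    intro i hi
    have h1 : 1 ≤ i := (PySem.List.mem_pyRange_one.mp hi).1
    simp [pvCond, h1]
  simp only [List.nil_append, List.map_map]
  have hb : (fun (x : Int) => decide (((x, pvG seq x).2 : Int) = 0 ∧
      (pvG seq ((x, pvG seq x).1 - 1) ≠ 0 ∧ pvG seq ((x, pvG seq x).1 + 1) = 0 ∨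
       pvG seq ((x, pvG seq x).1 - 1) = 0 ∧ pvG seq ((x, pvG seq x).1 + 1) ≠ 0)))
      = (fun i => decide (pvG seq i = 0 ∧
      (pvG seq (i - 1) ≠ 0 ∧ pvG seq (i + 1) = 0 ∨ pvG seq (i - 1) = 0 ∧ pvG seq (i + 1) ≠ 0))) := rfl
  rw [hb, hfilter]
  have h1 : (Prod.fst ∘ fun i : Int => (i, pvG seq i)) = id := rfl
  have h2 : (Prod.snd ∘ fun i : Int => (i, pvG seq i)) = fun i => pvG seq i := rfl
  rw [Prod.mk.injEq]
  refine ⟨by rw [h1, List.map_id], ?_⟩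
  rw [h2]
  apply List.map_congr_left
  intro i hi
  have := List.of_mem_filter hi
  simp only [pvCond, decide_eq_true_eq] at this
  exact this.2.1

lemma pvF_step (seq : List Int) (m : Int) (hc : pvCond seq m = false) :
    pvF seq m = pvF seq (m + 1) := by
  by_cases h : m < (seq.length : Int) - 1
  · rw [pvF_cons seq m h, hc]; simp
  · rw [pvF_nil seq m (by omega), pvF_nil seq (m + 1) (by omega)]

-- B's loop invariant: from any consistent state it appends exactly pvE
lemma pv_loop_eq (seq : List Int) (l : List Int) (j : Int) (start : Option Int)
    (acc : List Int × List Int)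
    (hl : seq.drop j.toNat = l) (hj : 0 ≤ j) (hlen : j + (l.length : Int) = (seq.length : Int))
    (hst : match start with
      | none => j = 0 ∨ pvG seq (j - 1) ≠ 0
      | some s => 0 ≤ s ∧ s + 1 ≤ j ∧ (∀ k, s ≤ k → k ≤ j - 1 → pvG seq k = 0) ∧
          (s = 0 ∨ pvG seq (s - 1) ≠ 0)) :
    pvLoop (seq.length : Int) seq l j start acc
      = (acc.1 ++ pvE seq j start, acc.2 ++ (pvE seq j start).map (fun _ => (0 : Int))) := by
  induction l generalizing j start acc with
  | nil =>
    have hjn : j = (seq.length : Int) := by simp at hlen; omega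
    cases start with
    | none =>
      simp only [pvLoop, pvE]
      rw [pvF_nil seq j (by omega)]
      simp
    | some s =>
      obtain ⟨hs0, hsj, hrun, hmax⟩ := hst
      simp only [pvLoop, pvE, pvClose]
      rw [pvF_nil seq (j - 1) (by omega)]
      by_cases hB : 1 ≤ s ∧ s ≤ (seq.length : Int) - 2
      · have hz : PySem.List.pyGetD seq s 0 = 0 := hrun s le_rfl (by omega)
        rw [if_pos (show s < (seq.length : Int) - 1 by omega), if_pos hB,
          if_neg (show ¬(1 ≤ (seq.length : Int) - 1 ∧
            (seq.length : Int) - 1 ≤ (seq.length : Int) - 2) by omega),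
          if_pos (show 1 ≤ s ∧ s ≤ j - 2 by omega), hz]
        simp
      · rw [if_neg (show ¬(1 ≤ s ∧ s ≤ j - 2) by omega)]
        by_cases hA : s < (seq.length : Int) - 1
        · rw [if_pos hA, if_neg hB,
            if_neg (show ¬(1 ≤ (seq.length : Int) - 1 ∧
              (seq.length : Int) - 1 ≤ (seq.length : Int) - 2) by omega)]
          simp
        · rw [if_neg hA]
          simp
  | cons v t ih =>
    obtain ⟨hv, ht, hjlt⟩ := pv_drop_cons seq j v t hj hl
    have hlen' : j + 1 + (t.length : Int) = (seq.length : Int) := by simp at hlen ⊢; omega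
    have hj1 : j + 1 - 1 = j := by ring
    cases start with
    | none =>
      by_cases hv0 : v = 0
      · simp only [pvLoop, if_pos hv0]
        have hrun' : ∀ k, j ≤ k → k ≤ j + 1 - 1 → pvG seq k = 0 := by
          intro k hk1 hk2
          have hkj : k = j := by omega
          rw [hkj, hv, hv0]
        rw [ih (j + 1) (some j) acc ht (by omega) hlen'
          ⟨by omega, by omega, hrun', hst⟩]
        have hE : pvE seq (j + 1) (some j) = pvE seq j none := by
          simp only [pvE, hj1]
          rw [if_neg (by omega)]
          simp
        rw [hE]
      · simp only [pvLoop, if_neg hv0]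
        have hgj : pvG seq j ≠ 0 := by rw [hv]; exact hv0
        rw [ih (j + 1) none acc ht (by omega) hlen' (Or.inr (by rw [hj1]; exact hgj))]
        have hcj : pvCond seq j = false := by
          simp only [pvCond, decide_eq_false_iff_not]
          rintro ⟨-, hz, -⟩
          exact hgj hz
        have hE : pvE seq (j + 1) none = pvE seq j none := by
          simp only [pvE]
          rw [← pvF_step seq j hcj]
        rw [hE]
    | some s =>
      obtain ⟨hs0, hsj, hrun, hmax⟩ := hst
      by_cases hv0 : v = 0
      · simp only [pvLoop, if_pos hv0]
        have hrun' : ∀ k, s ≤ k → k ≤ j + 1 - 1 → pvG seq k = 0 := by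
          intro k hk1 hk2
          rcases lt_or_eq_of_le (show k ≤ j by omega) with h | h
          · exact hrun k hk1 (by omega)
          · rw [h, hv, hv0]
        rw [ih (j + 1) (some s) acc ht (by omega) hlen' ⟨hs0, by omega, hrun', hmax⟩]
        have hE : pvE seq (j + 1) (some s) = pvE seq j (some s) := by
          simp only [pvE, hj1]
          rw [pvF_cons seq (j - 1) (by omega), show j - 1 + 1 = j from by ring]
          by_cases hcase : s ≤ j - 2
          · have hc : pvCond seq (j - 1) = false := by
              have e1 : pvG seq (j - 1 - 1) = 0 := by
                rw [show j - 1 - 1 = j - 2 from by ring]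
                exact hrun (j - 2) (by omega) (by omega)
              have e2 : pvG seq (j - 1 + 1) = 0 := by
                rw [show j - 1 + 1 = j from by ring, hv]; exact hv0
              simp only [pvCond, decide_eq_false_iff_not]
              rintro ⟨-, -, ⟨ha, -⟩ | ⟨-, hb⟩⟩
              · exact ha e1
              · exact hb e2
            have h12 : (1 ≤ s ∧ s ≤ j + 1 - 2) ↔ (1 ≤ s ∧ s ≤ j - 2) := by omega
            simp [h12, hc]
          · by_cases hs1 : 1 ≤ s
            · have hne : pvG seq (s - 1) ≠ 0 := hmax.resolve_left (by omega)
              have hc : pvCond seq (j - 1) = true := by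
                simp only [pvCond, decide_eq_true_eq]
                refine ⟨by omega, ?_, Or.inl ⟨?_, ?_⟩⟩
                · rw [show j - 1 = s from by omega]
                  exact hrun s le_rfl (by omega)
                · rw [show j - 1 - 1 = s - 1 from by omega]
                  exact hne
                · rw [show j - 1 + 1 = j from by ring, hv]; exact hv0
              rw [hc, if_pos (show 1 ≤ s ∧ s ≤ j + 1 - 2 by omega),
                if_neg (show ¬(1 ≤ s ∧ s ≤ j - 2) by omega)]
              simp [show j - 1 = s from by omega]
            · have hc : pvCond seq (j - 1) = false := by
                simp only [pvCond, decide_eq_false_iff_not]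
                rintro ⟨hge, -, -⟩
                omega
              rw [hc, if_neg (by omega), if_neg (by omega)]
              simp
        rw [hE]
      · simp only [pvLoop, if_neg hv0]
        have hgj : pvG seq j ≠ 0 := by rw [hv]; exact hv0
        rw [ih (j + 1) none (pvClose (seq.length : Int) seq acc s (j - 1)) ht (by omega) hlen'
          (Or.inr (by rw [hj1]; exact hgj))]
        have hcj : pvCond seq j = false := by
          simp only [pvCond, decide_eq_false_iff_not]
          rintro ⟨-, hz, -⟩
          exact hgj hz
        simp only [pvE]
        rw [pvF_cons seq (j - 1) (by omega), show j - 1 + 1 = j from by ring,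
          pvF_step seq j hcj]
        simp only [pvClose]
        by_cases hcase : s ≤ j - 2
        · have hc : pvCond seq (j - 1) = true := by
            simp only [pvCond, decide_eq_true_eq]
            refine ⟨by omega, ?_, Or.inr ⟨?_, ?_⟩⟩
            · exact hrun (j - 1) (by omega) (by omega)
            · rw [show j - 1 - 1 = j - 2 from by ring]
              exact hrun (j - 2) (by omega) (by omega)
            · rw [show j - 1 + 1 = j from by ring, hv]; exact hv0
          have hz1 : PySem.List.pyGetD seq (j - 1) 0 = 0 := hrun (j - 1) (by omega) (by omega)
          rw [if_pos (show s < j - 1 by omega),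
            if_pos (show 1 ≤ j - 1 ∧ j - 1 ≤ (seq.length : Int) - 2 by omega), hc, hz1]
          by_cases hs1 : 1 ≤ s
          · have hz0 : PySem.List.pyGetD seq s 0 = 0 := hrun s le_rfl (by omega)
            rw [if_pos (show 1 ≤ s ∧ s ≤ (seq.length : Int) - 2 by omega),
              if_pos (show 1 ≤ s ∧ s ≤ j - 2 by omega), hz0]
            simp
          · rw [if_neg (show ¬(1 ≤ s ∧ s ≤ (seq.length : Int) - 2) by omega),
              if_neg (show ¬(1 ≤ s ∧ s ≤ j - 2) by omega)]
            simp
        · have hc : pvCond seq (j - 1) = false := by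
            simp only [pvCond, decide_eq_false_iff_not]
            rintro ⟨hge, -, ⟨-, hb⟩ | ⟨ha, -⟩⟩
            · rw [show j - 1 + 1 = j from by ring, hv] at hb
              exact hv0 hb
            · have hne : pvG seq (s - 1) ≠ 0 := hmax.resolve_left (by omega)
              rw [show j - 1 - 1 = s - 1 from by omega] at ha
              exact hne ha
          rw [if_neg (show ¬ s < j - 1 by omega), hc,
            if_neg (show ¬(1 ≤ s ∧ s ≤ j - 2) by omega)]
          simp

-- ===== VERDICT (by name: the statement is the Claim_ definition above) =====
theorem zeroSequences_spec : Claim_equal_zeroSequences := by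
  intro seq _
  show zeroSequences seq = zeroSequences_alt seq
  have hB : zeroSequences_alt seq
      = (pvF seq 0, (pvF seq 0).map (fun _ => (0 : Int))) := by
    have := pv_loop_eq seq seq 0 none ([], []) (by simp) le_rfl (by simp) (Or.inl rfl)
    simpa [zeroSequences_alt, pvE] using this
  have h01 : pvF seq 0 = pvF seq 1 := by
    by_cases h : (0 : Int) < (seq.length : Int) - 1
    · rw [pvF_cons seq 0 h]
      have : pvCond seq 0 = false := by simp [pvCond]
      simp [this]
    · rw [pvF_nil seq 0 (by omega), pvF_nil seq 1 (by omega)]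
  rw [pv_A_char, hB, h01]
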